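-- pv_equiv track=rewrite | github.com/pershai/architectural-dna | pattern_extractor.py | _find_python_block_end
-- ===== SOURCE A (Python) =====
-- def _find_python_block_end(lines: list[str], start: int) -> int:
--     """Find the end of a Python block (class or function)."""
--     if start >= len(lines):
--         return start
--
--     # Get the indentation of the definition line
--     first_line = lines[start]
--     base_indent = len(first_line) - len(first_line.lstrip())
--
--     end = start + 1
--     while end < len(lines):
--         line = lines[end]
--
--         # Empty lines are part of the block
--         if not line.strip():
--             end += 1
--             continue
--
--         # Check indentation
--         current_indent = len(line) - len(line.lstrip())
--         if current_indent <= base_indent and line.strip():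
--             # Found a line at same or lower indentation
--             break
--
--         end += 1
--
--     # Trim trailing empty lines
--     while end > start and not lines[end - 1].strip():
--         end -= 1
--
--     return end - 1
-- ===== SOURCE B (Python) =====
-- def _find_python_block_end(lines: list[str], start: int) -> int:
--     """Find the end of a Python block (class or function)."""
--     if start >= len(lines):
--         return start
--
--     def indent(i: int) -> int:
--         return len(lines[i]) - len(lines[i].lstrip())
--
--     base = indent(start)
--     # Index the non-blank lines after the header once, cut at the block
--     # boundary (first one not indented deeper than the header), and the
--     # answer is the last index of that prefix (the header line if empty).
--     nonblank = [i for i in range(start + 1, len(lines)) if lines[i].strip()]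
--     cut = next((k for k, i in enumerate(nonblank) if indent(i) <= base), len(nonblank))
--     body = nonblank[:cut]
--     return body[-1] if body else start
-- ===== Notes on version B (the rewrite author's own statement) =====
-- stated objective: alternative
-- what changed: Replaces A's stateful scan-with-break followed by a backward trim of trailing blanks with a declarative pipeline: build the list of non-blank line indices after the header once, cut it at the first entry not indented deeper than the header, and return the last index of that prefix (the header index if the prefix is empty).
-- intended difference: When lines[start] is itself blank and no non-blank line deeper than its indentation precedes the block boundary, A's backward trim runs past start and A returns start-1, an index before the block; B returns start, the intended last line of an empty block. — e.g. on _find_python_block_end([""], 0): A returns -1, B returns 0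
-- outside the precondition, e.g. on _find_python_block_end(['', 'a'], -2): A returns -3, B returns -2
import Mathlib
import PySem

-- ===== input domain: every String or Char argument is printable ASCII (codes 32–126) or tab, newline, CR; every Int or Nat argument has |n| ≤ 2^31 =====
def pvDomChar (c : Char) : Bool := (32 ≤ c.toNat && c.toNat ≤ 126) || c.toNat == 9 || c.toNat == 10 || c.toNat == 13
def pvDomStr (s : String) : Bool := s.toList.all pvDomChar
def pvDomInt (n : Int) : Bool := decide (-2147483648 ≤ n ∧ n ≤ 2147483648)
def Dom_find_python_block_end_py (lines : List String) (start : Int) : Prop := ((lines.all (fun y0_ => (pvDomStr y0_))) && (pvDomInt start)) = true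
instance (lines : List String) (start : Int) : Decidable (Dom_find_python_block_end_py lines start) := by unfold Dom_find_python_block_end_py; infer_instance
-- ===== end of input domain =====

-- B replaces A's stateful scan-with-break plus backward trim by a pipeline: index the
-- non-blank lines after the header once, cut at the block boundary, return the prefix's
-- last index (objective: alternative decomposition, same cost).

-- ===== PORT A =====
-- "not line.strip()"
def pvBlank (s : String) : Bool := PySem.Str.strip s == ""
-- "len(line) - len(line.lstrip())"
def pvIndent (s : String) : Int := PySem.Str.len s - PySem.Str.len (PySem.Str.lstrip s)

-- while end < len(lines): … (fuel = number of remaining iterations, ≥ len(lines) at the call)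
def pvLoopA (lines : List String) (base : Int) : Nat → Int → Int
  | 0, e => e
  | fuel+1, e =>
    if e < (lines.length : Int) then
      match PySem.List.pyGet? lines e with
      | none => e   -- Python IndexError; unreachable for 0 ≤ e < len
      | some line =>
        if pvBlank line then pvLoopA lines base fuel (e+1)
        else if decide (pvIndent line ≤ base) && !(pvBlank line) then e
        else pvLoopA lines base fuel (e+1)
    else e

-- while end > start and not lines[end-1].strip(): end -= 1
def pvTrimA (lines : List String) (start : Int) : Nat → Int → Int
  | 0, e => e
  | fuel+1, e =>
    if start < e then
      match PySem.List.pyGet? lines (e-1) with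
      | none => e   -- Python IndexError; unreachable inside Pre_
      | some line => if pvBlank line then pvTrimA lines start fuel (e-1) else e
    else e

def find_python_block_end_py (lines : List String) (start : Int) : Int :=
  if start ≥ (lines.length : Int) then start
  else
    match PySem.List.pyGet? lines start with
    | none => start   -- Python raises IndexError here (start < -len); excluded by Pre_
    | some first_line =>
      let base_indent := pvIndent first_line
      pvTrimA lines start (lines.length + start.natAbs) (pvLoopA lines base_indent lines.length (start+1)) - 1

-- ===== PORT B =====
-- nonblank = [i for i in range(start+1, len(lines)) if lines[i].strip()];
-- cut = next((k for k, i in enumerate(nonblank) if indent(i) <= base), len(nonblank));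
-- body = nonblank[:cut].  Every i drawn from the range satisfies 0 ≤ i < len (Pre_ gives
-- 0 ≤ start), so lines[i] is exactly lines.getD i.toNat "".
def pvBody (lines : List String) (base : Int) (e : Int) : List Int :=
  let nonblank := (PySem.List.pyRange e (lines.length : Int) 1).filter
    (fun i => !pvBlank (lines.getD i.toNat ""))
  let cut := (nonblank.findIdx? (fun i => decide (pvIndent (lines.getD i.toNat "") ≤ base))).getD
    nonblank.length
  nonblank.take cut

def find_python_block_end_py_alt (lines : List String) (start : Int) : Int :=
  if start ≥ (lines.length : Int) then start
  else
    match PySem.List.pyGet? lines start with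
    | none => start   -- Python raises IndexError here; excluded by Pre_
    | some first_line =>
      -- "return body[-1] if body else start"
      (pvBody lines (pvIndent first_line) (start+1)).getLast?.getD start

-- ===== PRECONDITION & SPEC =====
-- Pre_ excludes negative start, on which A raises IndexError (start < -len) or otherwise
-- returns values produced by accidental Python negative-index wraparound, outside the
-- function's natural domain (a line index into lines).
def Pre_find_python_block_end_py (lines : List String) (start : Int) : Prop := 0 ≤ start
instance (lines : List String) (start : Int) : Decidable (Pre_find_python_block_end_py lines start) := by unfold Pre_find_python_block_end_py; infer_instance
def pvWitness_find_python_block_end_py : List String × Int := (["def f():", "    x = 1"], 0)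

-- When lines[start] is itself blank and no deeper-indented non-blank line precedes the block
-- boundary, A's backward trim runs past start and A returns start-1 (an index before the block
-- it was asked about), while B returns start, the intended last line of an empty block.
def D_find_python_block_end_py (lines : List String) (start : Int) : Prop :=
  0 ≤ start ∧ start < (lines.length : Int) ∧ pvBlank (lines.getD start.toNat "") = true ∧
  ∀ l ∈ ((lines.drop (start.toNat + 1)).dropWhile pvBlank).head?,
    pvIndent l ≤ pvIndent (lines.getD start.toNat "")
instance (lines : List String) (start : Int) : Decidable (D_find_python_block_end_py lines start) := by unfold D_find_python_block_end_py; infer_instance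

def Spec_find_python_block_end_py (lines : List String) (start : Int) (out : Int) : Prop := ¬ D_find_python_block_end_py lines start → out = find_python_block_end_py_alt lines start
instance (lines : List String) (start : Int) (out : Int) : Decidable (Spec_find_python_block_end_py lines start out) := by unfold Spec_find_python_block_end_py; infer_instance

def pvDiffWitness_find_python_block_end_py : List String × Int := ([""], 0)
def pvDiffWitnessOut_find_python_block_end_py : Int × Int := (-1, 0)

-- ===== CLAIM (what is proved, stated in full; the proofs are below) =====
def Claim_unchanged_find_python_block_end_py : Prop := ∀ (lines : List String) (start : Int), Dom_find_python_block_end_py lines start → Pre_find_python_block_end_py lines start → Spec_find_python_block_end_py lines start (find_python_block_end_py lines start)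
def Claim_changed_find_python_block_end_py : Prop := Dom_find_python_block_end_py (pvDiffWitness_find_python_block_end_py.1) (pvDiffWitness_find_python_block_end_py.2) ∧ Pre_find_python_block_end_py (pvDiffWitness_find_python_block_end_py.1) (pvDiffWitness_find_python_block_end_py.2) ∧ D_find_python_block_end_py (pvDiffWitness_find_python_block_end_py.1) (pvDiffWitness_find_python_block_end_py.2) ∧ find_python_block_end_py (pvDiffWitness_find_python_block_end_py.1) (pvDiffWitness_find_python_block_end_py.2) = pvDiffWitnessOut_find_python_block_end_py.1 ∧ find_python_block_end_py_alt (pvDiffWitness_find_python_block_end_py.1) (pvDiffWitness_find_python_block_end_py.2) = pvDiffWitnessOut_find_python_block_end_py.2 ∧ pvDiffWitnessOut_find_python_block_end_py.1 ≠ pvDiffWitnessOut_find_python_block_end_py.2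
def Claim_exact_find_python_block_end_py : Prop := ∀ (lines : List String) (start : Int), Dom_find_python_block_end_py lines start → Pre_find_python_block_end_py lines start → D_find_python_block_end_py lines start → find_python_block_end_py lines start ≠ find_python_block_end_py_alt lines start

-- ===== LEMMAS AND PROOFS =====

theorem pv_get_some (lines : List String) (e : Int) (h0 : 0 ≤ e) (h1 : e < (lines.length : Int)) :
    PySem.List.pyGet? lines e = some (lines.getD e.toNat "") := by
  have ht : e.toNat < lines.length := by omega
  rw [PySem.List.pyGet?_of_nonneg _ h0, List.getElem?_eq_getElem ht, List.getD_eq_getElem _ _ ht]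

theorem pvTrimA_self (lines : List String) (start : Int) (fuel : Nat) :
    pvTrimA lines start fuel start = start := by
  cases fuel <;> simp [pvTrimA]

-- characterization of the backward trim from e, given a run of blanks (last, e)
theorem pvTrimA_eval (lines : List String) (start last : Int) :
    ∀ (fuel : Nat) (e : Int), e - start ≤ (fuel : Int) → 0 ≤ start → start ≤ last → last < e → e ≤ (lines.length : Int) →
    (∀ k : Int, last < k → k < e → pvBlank (lines.getD k.toNat "") = true) →
    (last = start ∨ pvBlank (lines.getD last.toNat "") = false) →
    pvTrimA lines start fuel e = if last = start ∧ pvBlank (lines.getD start.toNat "") = true then start else last + 1 := by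
  intro fuel
  induction fuel with
  | zero => intro e hfe h0 hsl hle hen hbl hlast; omega
  | succ n ih =>
    intro e hfe h0 hsl hle hen hbl hlast
    have hse : start < e := by omega
    rw [pvTrimA, if_pos hse]
    simp only [pv_get_some lines (e-1) (by omega) (by omega)]
    by_cases hl : last < e - 1
    · have hb : pvBlank (lines.getD (e-1).toNat "") = true := hbl (e-1) (by omega) (by omega)
      rw [if_pos hb]
      exact ih (e-1) (by omega) h0 hsl (by omega) (by omega)
        (fun k hk1 hk2 => hbl k hk1 (by omega)) hlast
    · have he1 : e - 1 = last := by omega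
      rcases hlast with h1 | h1
      · by_cases hb : pvBlank (lines.getD start.toNat "") = true
        · rw [he1, h1, if_pos hb, if_pos ⟨rfl, hb⟩, pvTrimA_self]
        · rw [he1, h1, if_neg hb, if_neg (fun hc => hb hc.2)]
          omega
      · rw [he1, if_neg (by rw [h1]; exact Bool.false_ne_true)]
        rw [if_neg (fun hc => by rw [hc.1] at h1; rw [hc.2] at h1; simp at h1)]
        omega

-- step lemmas for B's pipeline: pvBody at index e, by the shape of line e
theorem pvBody_stop (lines : List String) (base e : Int) (h : (lines.length : Int) ≤ e) :
    pvBody lines base e = [] := by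
  have : PySem.List.pyRange e (lines.length : Int) 1 = [] := by
    unfold PySem.List.pyRange; simp; omega
  simp [pvBody, this]

theorem pvBody_blank (lines : List String) (base e : Int) (h : e < (lines.length : Int))
    (hb : pvBlank (lines.getD e.toNat "") = true) :
    pvBody lines base e = pvBody lines base (e+1) := by
  simp only [pvBody]
  rw [PySem.List.pyRange_one_cons h, List.filter_cons_of_neg (by simp only [hb, Bool.not_true]; decide)]

theorem pvBody_cut (lines : List String) (base e : Int) (h : e < (lines.length : Int))
    (hb : pvBlank (lines.getD e.toNat "") = false)
    (hi : pvIndent (lines.getD e.toNat "") ≤ base) :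
    pvBody lines base e = [] := by
  simp only [pvBody]
  rw [PySem.List.pyRange_one_cons h, List.filter_cons_of_pos (by simp only [hb, Bool.not_false]),
    List.findIdx?_cons, if_pos (decide_eq_true hi)]
  rfl

theorem pvBody_deep (lines : List String) (base e : Int) (h : e < (lines.length : Int))
    (hb : pvBlank (lines.getD e.toNat "") = false)
    (hi : ¬ pvIndent (lines.getD e.toNat "") ≤ base) :
    pvBody lines base e = e :: pvBody lines base (e+1) := by
  simp only [pvBody]
  rw [PySem.List.pyRange_one_cons h, List.filter_cons_of_pos (by simp only [hb, Bool.not_false]),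
    List.findIdx?_cons, if_neg (by simp only [decide_eq_false hi]; decide)]
  cases ((PySem.List.pyRange (e+1) (lines.length : Int) 1).filter
      (fun i => !pvBlank (lines.getD i.toNat ""))).findIdx?
      (fun i => decide (pvIndent (lines.getD i.toNat "") ≤ base)) with
  | none => simp [List.take_succ_cons]
  | some k => simp [List.take_succ_cons]

-- "body[-1] if body else start": the value B extracts from the pipeline, as a function of
-- the scan origin e and the default (proof-side shorthand)
def pvLast (lines : List String) (base e last : Int) : Int :=
  (pvBody lines base e).getLast?.getD last

theorem pvLast_cons (a x : Int) (l : List Int) :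
    ((a :: l).getLast?).getD x = (l.getLast?).getD a := by
  cases l with
  | nil => rfl
  | cons y l =>
    rw [List.getLast?_cons_cons]
    rcases hl : (y :: l).getLast? with _ | z
    · simp [List.getLast?_eq_none_iff] at hl
    · simp

theorem pvLast_cases (lines : List String) (base : Int) :
    ∀ (fuel : Nat) (last e : Int), (lines.length : Int) - e ≤ (fuel : Int) →
    pvLast lines base e last = last ∨ e ≤ pvLast lines base e last := by
  intro fuel
  induction fuel with
  | zero =>
    intro last e hfe
    left; rw [pvLast, pvBody_stop lines base e (by omega)]; rfl
  | succ n ih =>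
    intro last e hfe
    by_cases h : e < (lines.length : Int)
    · by_cases hb : pvBlank (lines.getD e.toNat "") = true
      · rw [pvLast, pvBody_blank lines base e h hb]
        rcases ih last (e+1) (by omega) with h' | h'
        · left; exact h'
        · right; rw [pvLast] at h'; omega
      · replace hb := eq_false_of_ne_true hb
        by_cases hi : pvIndent (lines.getD e.toNat "") ≤ base
        · left; rw [pvLast, pvBody_cut lines base e h hb hi]; rfl
        · rw [pvLast, pvBody_deep lines base e h hb hi, pvLast_cons]
          rcases ih e (e+1) (by omega) with h' | h' <;> (right; rw [pvLast] at h'; omega)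
    · left; rw [pvLast, pvBody_stop lines base e (by omega)]; rfl

-- B's result with default start equals start iff the first non-blank line at or after e
-- (if any) has indentation ≤ base
theorem pvLast_eq_start_iff (lines : List String) (base start : Int) (h0 : 0 ≤ start) :
    ∀ (fuel : Nat) (e : Int), (lines.length : Int) - e ≤ (fuel : Int) → start < e →
    (pvLast lines base e start = start ↔
      ∀ l ∈ ((lines.drop e.toNat).dropWhile pvBlank).head?, pvIndent l ≤ base) := by
  intro fuel
  induction fuel with
  | zero =>
    intro e hfe hse
    rw [List.drop_eq_nil_of_le (by omega), pvLast, pvBody_stop lines base e (by omega)]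
    simp
  | succ n ih =>
    intro e hfe hse
    by_cases h : e < (lines.length : Int)
    · have hlt : e.toNat < lines.length := by omega
      have hd : lines.drop e.toNat = lines.getD e.toNat "" :: lines.drop (e.toNat + 1) := by
        rw [List.getD_eq_getElem _ _ hlt]
        exact List.drop_eq_getElem_cons hlt
      rw [hd]
      by_cases hb : pvBlank (lines.getD e.toNat "") = true
      · rw [pvLast, pvBody_blank lines base e h hb, List.dropWhile_cons_of_pos hb]
        have hih := ih (e+1) (by omega) (by omega)
        rw [show (e+1 : Int).toNat = e.toNat + 1 from by omega] at hih
        exact hih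
      · replace hb := eq_false_of_ne_true hb
        rw [List.dropWhile_cons_of_neg (by simpa using hb)]
        by_cases hi : pvIndent (lines.getD e.toNat "") ≤ base
        · rw [pvLast, pvBody_cut lines base e h hb hi]
          constructor
          · intro _ l hl
            simp only [List.head?_cons, Option.mem_def, Option.some.injEq] at hl
            rw [← hl]; exact hi
          · intro _; rfl
        · rw [pvLast, pvBody_deep lines base e h hb hi, pvLast_cons]
          constructor
          · intro hL; exfalso
            rcases pvLast_cases lines base n e (e+1) (by omega) with h' | h' <;>
              (rw [pvLast] at h'; omega)
          · intro hR; exfalso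
            exact hi (hR _ (by simp))
    · rw [List.drop_eq_nil_of_le (by omega), pvLast, pvBody_stop lines base e (by omega)]
      simp
-- the two programs run in sync: A's trimmed end equals B's pipeline value + 1, except when
-- the pipeline falls back to a blank start line
theorem pv_sync (lines : List String) (base start : Int) (h0 : 0 ≤ start) :
    ∀ (fuel : Nat) (e last : Int), (lines.length : Int) - e ≤ (fuel : Int) → start ≤ last → last < e → e ≤ (lines.length : Int) →
    (∀ k : Int, last < k → k < e → pvBlank (lines.getD k.toNat "") = true) →
    (last = start ∨ (pvBlank (lines.getD last.toNat "") = false ∧ base < pvIndent (lines.getD last.toNat ""))) →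
    pvTrimA lines start (lines.length + start.natAbs) (pvLoopA lines base fuel e) =
      if pvLast lines base e last = start ∧ pvBlank (lines.getD start.toNat "") = true then start
      else pvLast lines base e last + 1 := by
  intro fuel
  induction fuel with
  | zero =>
    intro e last hfe hsl hle hen hbl hlast
    have hps : pvLast lines base e last = last := by
      rw [pvLast, pvBody_stop lines base e (by omega)]; rfl
    rw [pvLoopA, hps]
    exact pvTrimA_eval lines start last (lines.length + start.natAbs) e (by omega) h0 hsl hle hen hbl
      (hlast.imp id And.left)
  | succ n ih =>
    intro e last hfe hsl hle hen hbl hlast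
    rw [pvLoopA]
    by_cases h : e < (lines.length : Int)
    · rw [if_pos h]
      simp only [pv_get_some lines e (by omega) h]
      by_cases hb : pvBlank (lines.getD e.toNat "") = true
      · rw [if_pos hb, pvLast, pvBody_blank lines base e h hb, ← pvLast]
        refine ih (e+1) last (by omega) hsl (by omega) (by omega) ?_ hlast
        intro k hk1 hk2
        by_cases hke : k < e
        · exact hbl k hk1 hke
        · rw [show k = e from by omega]; exact hb
      · replace hbf := eq_false_of_ne_true hb
        by_cases hi : pvIndent (lines.getD e.toNat "") ≤ base
        · have hps : pvLast lines base e last = last := by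
            rw [pvLast, pvBody_cut lines base e h hbf hi]; rfl
          rw [if_neg hb, if_pos (by rw [decide_eq_true hi, hbf]; rfl), hps]
          exact pvTrimA_eval lines start last (lines.length + start.natAbs) e (by omega) h0 hsl hle hen hbl
            (hlast.imp id And.left)
        · rw [if_neg hb, if_neg (by rw [eq_false_of_ne_true (fun hd => hi (of_decide_eq_true hd))]; simp)]
          rw [pvLast, pvBody_deep lines base e h hbf hi, pvLast_cons, ← pvLast]
          refine ih (e+1) e (by omega) (by omega) (by omega) (by omega) ?_ ?_
          · intro k hk1 hk2; exact absurd hk1 (by omega)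
          · exact Or.inr ⟨hbf, by omega⟩
    · have hps : pvLast lines base e last = last := by
        rw [pvLast, pvBody_stop lines base e (by omega)]; rfl
      rw [if_neg h, hps]
      exact pvTrimA_eval lines start last (lines.length + start.natAbs) e (by omega) h0 hsl hle hen hbl
        (hlast.imp id And.left)

-- ===== VERDICT (by name: the statement is the Claim_ definition above) =====
theorem find_python_block_end_py_spec : Claim_unchanged_find_python_block_end_py := by
  intro lines start hdom hpre hnd
  have h0 : (0:Int) ≤ start := hpre
  unfold find_python_block_end_py find_python_block_end_py_alt
  by_cases hge : start ≥ (lines.length : Int)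
  · rw [if_pos hge, if_pos hge]
  · rw [if_neg hge, if_neg hge]
    have hs : start < (lines.length : Int) := by omega
    simp only [pv_get_some lines start h0 hs]
    have hsync := pv_sync lines (pvIndent (lines.getD start.toNat "")) start h0
      lines.length (start+1) start (by omega) (le_refl start) (by omega) (by omega)
      (fun k hk1 hk2 => absurd hk1 (by omega)) (Or.inl rfl)
    rw [hsync]
    by_cases hcond : pvLast lines (pvIndent (lines.getD start.toNat "")) (start+1) start = start ∧ pvBlank (lines.getD start.toNat "") = true
    · have hfb := (pvLast_eq_start_iff lines (pvIndent (lines.getD start.toNat "")) start h0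
        lines.length (start+1) (by omega) (by omega)).mp hcond.1
      rw [show (start+1 : Int).toNat = start.toNat + 1 from by omega] at hfb
      exact absurd ⟨h0, hs, hcond.2, hfb⟩ hnd
    · rw [if_neg hcond, pvLast]; omega

theorem find_python_block_end_py_changed : Claim_changed_find_python_block_end_py := by
  unfold Claim_changed_find_python_block_end_py; decide

theorem find_python_block_end_py_tight : Claim_exact_find_python_block_end_py := by
  intro lines start hdom hpre hd
  obtain ⟨h0, hs, hblk, hfb⟩ := hd
  unfold find_python_block_end_py find_python_block_end_py_alt
  rw [if_neg (by omega), if_neg (by omega)]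
  simp only [pv_get_some lines start h0 hs]
  rw [← show (start+1 : Int).toNat = start.toNat + 1 from by omega] at hfb
  have hr : pvLast lines (pvIndent (lines.getD start.toNat "")) (start+1) start = start :=
    (pvLast_eq_start_iff lines (pvIndent (lines.getD start.toNat "")) start h0
      lines.length (start+1) (by omega) (by omega)).mpr hfb
  have hsync := pv_sync lines (pvIndent (lines.getD start.toNat "")) start h0
    lines.length (start+1) start (by omega) (le_refl start) (by omega) (by omega)
    (fun k hk1 hk2 => absurd hk1 (by omega)) (Or.inl rfl)
  rw [hsync, if_pos ⟨hr, hblk⟩]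
  rw [pvLast] at hr
  rw [hr]
  omega
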